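-- pv_equiv track=rewrite | github.com/renine94/codingTest | programmers/Level_2/02_타일개수찾기.py | solution
-- ===== SOURCE A (Python) =====
-- def solution(brown, yellow):
--     # 전체 타일 개수
--     total_tiles = brown + yellow
--
--     # 가로, 세로 길이 후보 탐색
--     for y in range(1, total_tiles // 2 + 1):
--         x = total_tiles // y
--         if total_tiles % y == 0 and x >= y:
--             if 2 * x + 2 * y - 4 == brown:
--                 return [x, y]
--
--     # 유효한 해가 없는 경우
--     return []
-- ===== SOURCE B (Python) =====
-- def _isqrt(n):
--     # integer square root by Newton iteration (n >= 0)
--     if n <= 1: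
--         return n
--     guess = n // 2
--     nxt = (guess + n // guess) // 2
--     while nxt < guess:
--         guess = nxt
--         nxt = (guess + n // guess) // 2
--     return guess
--
--
-- def solution(brown, yellow):
--     # x + y and x * y are known, so x and y are roots of a quadratic.
--     if brown % 2 != 0:
--         return []
--     total = brown + yellow
--     s = (brown + 4) // 2          # x + y
--     disc = s * s - 4 * total      # (x - y)^2
--     if disc < 0:
--         return []
--     r = _isqrt(disc)
--     if r * r != disc:
--         return []
--     y = (s - r) // 2
--     if y < 1:
--         return []
--     return [s - y, y]
-- ===== Notes on version B (the rewrite author's own statement) =====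
-- stated objective: faster
-- what changed: B replaces A's linear trial-division scan over range(1, (brown+yellow)//2+1) by solving the quadratic with root sum (brown+4)/2 and root product brown+yellow in closed form via a Newton integer square root.
-- intended difference: For brown=0, yellow=1 (a 1x1 all-yellow rectangle with no border tiles) A returns [] because its search range(1, total//2+1) is empty, while B returns [1, 1], the dimensions that actually satisfy the constraints, which is the intended answer. — e.g. on solution(0, 1): A returns [], B returns [1, 1]
import Mathlib
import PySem

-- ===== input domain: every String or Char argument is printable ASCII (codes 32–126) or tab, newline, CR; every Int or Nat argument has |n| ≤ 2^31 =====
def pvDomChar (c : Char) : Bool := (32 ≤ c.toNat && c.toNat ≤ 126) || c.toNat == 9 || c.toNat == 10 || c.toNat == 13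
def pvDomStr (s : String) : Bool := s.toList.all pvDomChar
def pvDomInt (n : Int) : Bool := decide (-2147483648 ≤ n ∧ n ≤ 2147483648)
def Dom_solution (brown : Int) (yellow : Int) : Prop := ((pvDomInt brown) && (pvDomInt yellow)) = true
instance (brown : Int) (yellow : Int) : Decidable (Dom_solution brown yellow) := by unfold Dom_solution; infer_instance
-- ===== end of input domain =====

-- B replaces A's trial-division loop over range(1, total//2+1) by the closed-form roots of the
-- quadratic with root sum (brown+4)/2 and root product brown+yellow, using a Newton integer
-- square root (objective: faster; measured faster in a timing run).

-- ===== PORT A =====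
-- the for-loop with its early return, as structural recursion over the range list
def solutionLoopA (total : Int) (brown : Int) : List Int → List Int
  | [] => []
  | y :: ys =>
      let x := PySem.Int.floordiv total y
      if PySem.Int.mod total y = 0 ∧ y ≤ x then
        if 2 * x + 2 * y - 4 = brown then [x, y] else solutionLoopA total brown ys
      else solutionLoopA total brown ys

def solution (brown : Int) (yellow : Int) : List Int :=
  let total := brown + yellow
  solutionLoopA total brown (PySem.List.pyRange 1 (PySem.Int.floordiv total 2 + 1) 1)

-- ===== PORT B =====
-- Source B's Newton `while nxt < guess` loop; its arguments are nonnegative Python ints,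
-- carried here as Nat (exact: `//` on nonnegative ints is Nat division)
def bIsqrtLoop (n : Nat) (guess : Nat) : Nat :=
  if _h : (guess + n / guess) / 2 < guess then bIsqrtLoop n ((guess + n / guess) / 2) else guess
termination_by guess

-- Source B's _isqrt (n ≥ 0 at both call sites)
def bIsqrt (n : Int) : Int :=
  if n ≤ 1 then n else (bIsqrtLoop n.toNat (n.toNat / 2) : Int)

def solution_alt (brown : Int) (yellow : Int) : List Int :=
  if PySem.Int.mod brown 2 ≠ 0 then []
  else
    let total := brown + yellow
    let s := PySem.Int.floordiv (brown + 4) 2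
    let disc := s * s - 4 * total
    if disc < 0 then []
    else
      let r := bIsqrt disc
      if r * r ≠ disc then []
      else
        let y := PySem.Int.floordiv (s - r) 2
        if y < 1 then [] else [s - y, y]

-- ===== PRECONDITION & SPEC =====
-- For brown = 0, yellow = 1 (a 1×1 all-yellow rectangle with no border tiles) A returns []
-- because its search range(1, total//2 + 1) is empty, while B returns [1, 1], the dimensions
-- that actually satisfy the brown/yellow constraints, which is the intended answer.
def D_solution (brown : Int) (yellow : Int) : Prop := brown = 0 ∧ yellow = 1
instance (brown : Int) (yellow : Int) : Decidable (D_solution brown yellow) := by unfold D_solution; infer_instance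
def Spec_solution (brown : Int) (yellow : Int) (out : List Int) : Prop := ¬ D_solution brown yellow → out = solution_alt brown yellow
instance (brown : Int) (yellow : Int) (out : List Int) : Decidable (Spec_solution brown yellow out) := by unfold Spec_solution; infer_instance
def pvDiffWitness_solution : Int × Int := (0, 1)
def pvDiffWitnessOut_solution : (List Int) × (List Int) := ([], [1, 1])

-- ===== CLAIM (what is proved, stated in full; the proofs are below) =====
def Claim_unchanged_solution : Prop := ∀ (brown : Int) (yellow : Int), Dom_solution brown yellow → Spec_solution brown yellow (solution brown yellow)
def Claim_changed_solution : Prop := Dom_solution (pvDiffWitness_solution.1) (pvDiffWitness_solution.2) ∧ D_solution (pvDiffWitness_solution.1) (pvDiffWitness_solution.2) ∧ solution (pvDiffWitness_solution.1) (pvDiffWitness_solution.2) = pvDiffWitnessOut_solution.1 ∧ solution_alt (pvDiffWitness_solution.1) (pvDiffWitness_solution.2) = pvDiffWitnessOut_solution.2 ∧ pvDiffWitnessOut_solution.1 ≠ pvDiffWitnessOut_solution.2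
def Claim_exact_solution : Prop := ∀ (brown : Int) (yellow : Int), Dom_solution brown yellow → D_solution brown yellow → solution brown yellow ≠ solution_alt brown yellow

-- ===== LEMMAS AND PROOFS =====

-- a valid decomposition: y rows of x ≥ y columns, x*y tiles in all, brown of them on the border
def GoodPair (brown : Int) (total : Int) (x : Int) (y : Int) : Prop :=
  1 ≤ y ∧ y ≤ x ∧ x * y = total ∧ 2 * x + 2 * y - 4 = brown

theorem goodPair_unique {brown total x₁ y₁ x₂ y₂ : Int}
    (h₁ : GoodPair brown total x₁ y₁) (h₂ : GoodPair brown total x₂ y₂) :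
    x₁ = x₂ ∧ y₁ = y₂ := by
  obtain ⟨hy₁, hxy₁, hp₁, hb₁⟩ := h₁
  obtain ⟨hy₂, hxy₂, hp₂, hb₂⟩ := h₂
  have hs : x₁ + y₁ = x₂ + y₂ := by omega
  have hd : (x₁ - y₁) * (x₁ - y₁) = (x₂ - y₂) * (x₂ - y₂) := by nlinarith
  have : x₁ - y₁ = x₂ - y₂ := by nlinarith
  omega

-- Source B's Newton loop is Lean core's Nat.sqrt iteration, word for word
theorem bIsqrtLoop_eq_iter (n guess : Nat) : bIsqrtLoop n guess = Nat.sqrt.iter n guess := by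
  fun_induction bIsqrtLoop n guess with
  | case1 g h ih => rw [Nat.sqrt.iter, dif_pos h]; exact ih
  | case2 g h => rw [Nat.sqrt.iter, dif_neg h]

-- spec of Source B's integer square root
theorem bIsqrt_spec {n : Int} (hn : 0 ≤ n) :
    0 ≤ bIsqrt n ∧ bIsqrt n * bIsqrt n ≤ n ∧ n < (bIsqrt n + 1) * (bIsqrt n + 1) := by
  unfold bIsqrt
  by_cases h1 : n ≤ 1
  · rw [if_pos h1]; constructor; omega; constructor; nlinarith; nlinarith
  · rw [if_neg h1, bIsqrtLoop_eq_iter]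
    have hn2 : n = (n.toNat : Int) := by omega
    have hm2 : 2 ≤ n.toNat := by omega
    have hstart : n.toNat < (n.toNat / 2 + 1) * (n.toNat / 2 + 1) := by
      have h2 : 1 ≤ n.toNat / 2 := by omega
      have h3 : n.toNat ≤ n.toNat / 2 * 2 + 1 := by omega
      nlinarith
    have hle := Nat.sqrt.iter_sq_le n.toNat (n.toNat / 2)
    have hlt := Nat.sqrt.lt_iter_succ_sq n.toNat (n.toNat / 2) hstart
    refine ⟨by positivity, ?_, ?_⟩ <;> rw [hn2] <;> exact_mod_cast ‹_›

theorem bIsqrt_of_sq {a n : Int} (ha : 0 ≤ a) (h : a * a = n) : bIsqrt n = a := by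
  have hn : 0 ≤ n := h ▸ mul_nonneg ha ha
  obtain ⟨h0, h2, h3⟩ := bIsqrt_spec hn
  nlinarith

-- B returns [x, y] whenever a valid decomposition exists
theorem B_of_pair {brown yellow x y : Int} (h : GoodPair brown (brown + yellow) x y) :
    solution_alt brown yellow = [x, y] := by
  obtain ⟨hy, hxy, hp, hb⟩ := h
  have hbe : PySem.Int.mod brown 2 = 0 := by
    rw [PySem.Int.mod_eq_emod_of_pos (show (0:Int) < 2 by norm_num)]; omega
  have hs : PySem.Int.floordiv (brown + 4) 2 = x + y := by
    rw [PySem.Int.floordiv_eq_ediv_of_pos (show (0:Int) < 2 by norm_num)]; omega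
  unfold solution_alt
  dsimp only
  rw [if_neg (not_not_intro hbe), hs]
  have hdisc : (x + y) * (x + y) - 4 * (brown + yellow) = (x - y) * (x - y) := by
    rw [← hp]; ring
  rw [hdisc, if_neg (not_lt.2 (mul_self_nonneg _))]
  rw [bIsqrt_of_sq (show (0:Int) ≤ x - y by omega) rfl]
  rw [if_neg (not_not_intro rfl)]
  have hyy : PySem.Int.floordiv (x + y - (x - y)) 2 = y := by
    rw [PySem.Int.floordiv_eq_ediv_of_pos (show (0:Int) < 2 by norm_num)]; omega
  rw [hyy, if_neg (not_lt.2 hy)]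
  have hx : x + y - y = x := by ring
  rw [hx]

-- if B returns a non-empty answer, some valid decomposition exists
theorem pair_of_B {brown yellow : Int} (h : solution_alt brown yellow ≠ []) :
    ∃ x y, GoodPair brown (brown + yellow) x y := by
  unfold solution_alt at h
  dsimp only at h
  by_cases h1 : PySem.Int.mod brown 2 ≠ 0
  · rw [if_pos h1] at h; exact absurd rfl h
  · rw [if_neg h1] at h
    push Not at h1
    rw [PySem.Int.mod_eq_emod_of_pos (show (0:Int) < 2 by norm_num)] at h1
    set s := PySem.Int.floordiv (brown + 4) 2 with hsdef
    have hs : 2 * s = brown + 4 := by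
      rw [hsdef, PySem.Int.floordiv_eq_ediv_of_pos (show (0:Int) < 2 by norm_num)]; omega
    by_cases h2 : s * s - 4 * (brown + yellow) < 0
    · rw [if_pos h2] at h; exact absurd rfl h
    · rw [if_neg h2] at h
      push Not at h2
      set r := bIsqrt (s * s - 4 * (brown + yellow)) with hrdef
      by_cases h3 : r * r ≠ s * s - 4 * (brown + yellow)
      · rw [if_pos h3] at h; exact absurd rfl h
      · rw [if_neg h3] at h
        push Not at h3
        have hr0 : 0 ≤ r := (bIsqrt_spec h2).1
        -- s and r have the same parity, since s² - r² = 4·(brown+yellow)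
        have h4 : (s - r) * (s + r) = 4 * (brown + yellow) := by nlinarith
        have hpar : (s - r) % 2 = 0 := by
          have hev : Even ((s - r) * (s + r)) := ⟨2 * (brown + yellow), by linarith⟩
          rcases Int.even_mul.mp hev with he | he <;> obtain ⟨c, hc⟩ := he <;> omega
        set y := PySem.Int.floordiv (s - r) 2 with hydef
        have hy2 : 2 * y = s - r := by
          rw [hydef, PySem.Int.floordiv_eq_ediv_of_pos (show (0:Int) < 2 by norm_num)]; omega
        by_cases h5 : y < 1
        · rw [if_pos h5] at h; exact absurd rfl h
        · push Not at h5
          have hr : r = s - 2 * y := by omega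
          have hsub : (s - 2 * y) * (s - 2 * y) = s * s - 4 * (brown + yellow) := by
            rw [← hr]; exact h3
          exact ⟨s - y, y, h5, by omega, by nlinarith, by omega⟩

-- the for-loop returns [] when no y in the range works
theorem loopA_none {total brown : Int} {L : List Int}
    (h : ∀ y ∈ L, ¬ (PySem.Int.mod total y = 0 ∧ y ≤ PySem.Int.floordiv total y ∧
          2 * PySem.Int.floordiv total y + 2 * y - 4 = brown)) :
    solutionLoopA total brown L = [] := by
  induction L with
  | nil => rfl
  | cons y ys ih =>
      have hy := h y (List.mem_cons_self)
      rw [solutionLoopA]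
      split_ifs with c1 c2
      · exact absurd ⟨c1.1, c1.2, c2⟩ hy
      · exact ih fun z hz => h z (List.mem_cons_of_mem _ hz)
      · exact ih fun z hz => h z (List.mem_cons_of_mem _ hz)

-- the for-loop returns [x, y] when y is the unique element of the range that works
theorem loopA_found {total brown y : Int} {L : List Int}
    (hmem : y ∈ L)
    (hC : PySem.Int.mod total y = 0 ∧ y ≤ PySem.Int.floordiv total y ∧
          2 * PySem.Int.floordiv total y + 2 * y - 4 = brown)
    (huniq : ∀ z ∈ L, (PySem.Int.mod total z = 0 ∧ z ≤ PySem.Int.floordiv total z ∧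
          2 * PySem.Int.floordiv total z + 2 * z - 4 = brown) → z = y) :
    solutionLoopA total brown L = [PySem.Int.floordiv total y, y] := by
  induction L with
  | nil => cases hmem
  | cons z zs ih =>
      rw [solutionLoopA]
      split_ifs with c1 c2
      · have : z = y := huniq z List.mem_cons_self ⟨c1.1, c1.2, c2⟩
        subst this; rfl
      · have hzy : z ≠ y := fun he => c2 (he ▸ hC.2.2)
        exact ih ((List.mem_cons.mp hmem).resolve_left (fun he => hzy he.symm)) fun w hw => huniq w (List.mem_cons_of_mem _ hw)
      · have hzy : z ≠ y := by
          intro he; subst he; exact c1 ⟨hC.1, hC.2.1⟩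
        exact ih ((List.mem_cons.mp hmem).resolve_left (fun he => hzy he.symm)) fun w hw => huniq w (List.mem_cons_of_mem _ hw)

-- the loop condition at z ≥ 1 holds iff (total/z, z) is a valid decomposition
theorem cond_iff_pair {brown total z : Int} (hz : 1 ≤ z) :
    (PySem.Int.mod total z = 0 ∧ z ≤ PySem.Int.floordiv total z ∧
      2 * PySem.Int.floordiv total z + 2 * z - 4 = brown)
    ↔ GoodPair brown total (PySem.Int.floordiv total z) z := by
  rw [PySem.Int.mod_eq_emod_of_pos (show (0:Int) < z by omega),
      PySem.Int.floordiv_eq_ediv_of_pos (show (0:Int) < z by omega)]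
  constructor
  · rintro ⟨h1, h2, h3⟩
    exact ⟨hz, h2, Int.ediv_mul_cancel (Int.dvd_of_emod_eq_zero h1), h3⟩
  · rintro ⟨_, h2, h3, h4⟩
    refine ⟨?_, h2, h4⟩
    have hdvd : z ∣ total := ⟨total / z, by linarith [h3, mul_comm (total / z) z]⟩
    exact Int.emod_eq_zero_of_dvd hdvd

theorem A_of_pair {brown yellow x y : Int} (h : GoodPair brown (brown + yellow) x y)
    (hD : ¬ D_solution brown yellow) : solution brown yellow = [x, y] := by
  obtain ⟨hy, hxy, hp, hb⟩ := h
  have hx2 : 2 ≤ x := by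
    by_contra hc
    have hx1 : x = 1 := by omega
    have hy1 : y = 1 := by omega
    exact hD ⟨by omega, by nlinarith⟩
  have hdv : PySem.Int.floordiv (brown + yellow) y = x := by
    rw [PySem.Int.floordiv_eq_ediv_of_pos (show (0:Int) < y by omega), ← hp,
        Int.mul_ediv_cancel _ (by omega)]
  have hmem : y ∈ PySem.List.pyRange 1 (PySem.Int.floordiv (brown + yellow) 2 + 1) 1 := by
    rw [PySem.List.mem_pyRange_one]
    refine ⟨hy, ?_⟩
    have : y ≤ PySem.Int.floordiv (brown + yellow) 2 := by
      rw [PySem.Int.le_floordiv_iff_mul_le (show (0:Int) < 2 by norm_num), ← hp]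
      nlinarith
    omega
  unfold solution
  dsimp only
  rw [loopA_found hmem ((cond_iff_pair hy).2 (by rw [hdv]; exact ⟨hy, hxy, hp, hb⟩)) ?_, hdv]
  intro z hz hc
  rw [PySem.List.mem_pyRange_one] at hz
  have hgp := (cond_iff_pair hz.1).1 hc
  exact (goodPair_unique hgp ⟨hy, hxy, hp, hb⟩).2

theorem A_none {brown yellow : Int} (h : ∀ x y, ¬ GoodPair brown (brown + yellow) x y) :
    solution brown yellow = [] := by
  unfold solution
  dsimp only
  apply loopA_none
  intro z hz hc
  rw [PySem.List.mem_pyRange_one] at hz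
  exact h _ _ ((cond_iff_pair hz.1).1 hc)

-- ===== VERDICT (by name: the statement is the Claim_ definition above) =====
theorem solution_spec : Claim_unchanged_solution := by
  intro brown yellow _ hD
  by_cases h : ∃ x y, GoodPair brown (brown + yellow) x y
  · obtain ⟨x, y, hgp⟩ := h
    rw [A_of_pair hgp hD, B_of_pair hgp]
  · push Not at h
    rw [A_none fun x y => h x y]
    by_contra hne
    obtain ⟨x, y, hgp⟩ := pair_of_B (fun he => hne he.symm)
    exact h x y hgp

theorem solution_changed : Claim_changed_solution := by unfold Claim_changed_solution; decide

theorem solution_tight : Claim_exact_solution := by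
  intro brown yellow _ hD
  obtain ⟨h1, h2⟩ := hD
  subst h1; subst h2
  decide
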